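-- pv_equiv track=rewrite | github.com/Arsen1302/Code-copy-detector | TestData/solutions/problem_1449_1_1.py | solution_1449_1_1
-- ===== SOURCE A (Python) =====
-- from typing import List
--
-- def solution_1449_1_1(recipes: List[str], ingredients: List[List[str]], supplies: List[str]) -> List[str]:
--     graph, can_make, supplies = {recipe : [] for recipe in recipes},  {}, set(supplies)
--     def solution_1449_1_2(recipe : str) -> bool:
--         if recipe not in can_make:
--             can_make[recipe] = False
--             can_make[recipe] = all([solution_1449_1_2(ingr) for ingr in graph[recipe]])
--         return can_make[recipe]
--     for i, recipe in enumerate(recipes):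
--         for ingr in ingredients[i]:
--             if ingr not in supplies:
--                 graph[recipe].append(ingr if ingr in graph else recipe)
--     return [recipe for recipe in recipes if solution_1449_1_2(recipe)]
-- ===== SOURCE B (Python) =====
-- from typing import List
--
-- def solution_1449_1_1(recipes: List[str], ingredients: List[List[str]], supplies: List[str]) -> List[str]:
--     supply = set(supplies)
--     need = {r: [] for r in recipes}
--     for i, r in enumerate(recipes):
--         need[r].extend(x for x in ingredients[i] if x not in supply)
--     makeable = set()
--     changed = True
--     while changed:
--         changed = False
--         for r in recipes:
--             if r not in makeable and all(x in makeable for x in need[r]):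
--                 makeable.add(r)
--                 changed = True
--     return [r for r in recipes if r in makeable]
-- ===== Notes on version B (the rewrite author's own statement) =====
-- stated objective: alternative
-- what changed: Replaces the memoized recursive DFS (cycle detection via a pre-seeded False) by an iterative worklist fixpoint: repeatedly sweep the recipe list, marking a recipe makeable once all of its non-supply ingredients are already-marked recipes, until a sweep changes nothing.
import Mathlib
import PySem

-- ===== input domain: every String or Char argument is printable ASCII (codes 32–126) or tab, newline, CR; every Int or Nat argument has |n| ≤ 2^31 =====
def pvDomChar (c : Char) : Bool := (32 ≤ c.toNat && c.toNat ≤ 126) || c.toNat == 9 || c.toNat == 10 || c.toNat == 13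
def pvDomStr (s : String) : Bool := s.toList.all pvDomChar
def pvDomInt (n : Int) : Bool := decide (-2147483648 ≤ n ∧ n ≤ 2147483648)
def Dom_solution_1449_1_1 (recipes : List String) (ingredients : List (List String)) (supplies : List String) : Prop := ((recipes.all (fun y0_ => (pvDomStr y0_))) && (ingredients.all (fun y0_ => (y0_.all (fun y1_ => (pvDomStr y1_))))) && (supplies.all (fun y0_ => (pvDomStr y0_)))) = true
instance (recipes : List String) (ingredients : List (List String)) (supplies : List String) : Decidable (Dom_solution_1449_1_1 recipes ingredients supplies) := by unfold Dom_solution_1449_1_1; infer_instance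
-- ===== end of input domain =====

-- B replaces A's memoized recursive DFS (with cycle detection via a pre-seeded False) by an
-- iterative fixpoint computation: repeat passes over the recipes, marking a recipe makeable once
-- all of its non-supply ingredients are already-marked recipes, until a pass changes nothing
-- (objective: alternative — a genuinely different algorithm, not claimed faster).

-- ===== PORT A =====
-- A-side helpers: graph = {recipe: []} seed, then the edge-building double loop, then the memoized DFS.
def aSeed (recipes : List String) : PySem.Dict String (List String) :=
  recipes.foldl (fun d r => d.insert r []) PySem.Dict.empty

def aBuild (supply : PySem.Set String) (ingredients : List (List String))
    (rows : List (Int × String)) (d : PySem.Dict String (List String)) :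
    PySem.Dict String (List String) :=
  rows.foldl (fun d p =>
    (PySem.List.pyGetD ingredients p.1 []).foldl (fun d2 ingr =>
      if PySem.Set.contains supply ingr then d2
      else d2.modify p.2 [] (fun l => l ++ [if d2.contains ingr then ingr else p.2])) d) d

-- the memoized DFS solution_1449_1_2; fuel only makes the recursion structural (each fresh call
-- inserts its key into the memo first, so `recipes.length + 1` fuel is never exhausted — proved below)
def dfsA (g : PySem.Dict String (List String)) :
    Nat → String → PySem.Dict String Bool → Bool × PySem.Dict String Bool
  | 0, _, m => (false, m)
  | f+1, r, m =>
    match m.get? r with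
    | some b => (b, m)
    | none =>
      let m1 := m.insert r false
      let p := (g.getD r []).foldl (fun (acc : List Bool × PySem.Dict String Bool) i =>
          let q := dfsA g f i acc.2
          (acc.1 ++ [q.1], q.2)) ([], m1)
      let v := p.1.all id
      (v, p.2.insert r v)

def solution_1449_1_1 (recipes : List String) (ingredients : List (List String))
    (supplies : List String) : List String :=
  let supply := PySem.Set.ofList supplies
  let graph := aBuild supply ingredients (PySem.List.enumerate recipes 0) (aSeed recipes)
  let res := recipes.foldl (fun (acc : List String × PySem.Dict String Bool) r =>
      let q := dfsA graph (recipes.length + 1) r acc.2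
      (if q.1 then acc.1 ++ [r] else acc.1, q.2)) ([], PySem.Dict.empty)
  res.1

-- ===== PORT B =====
-- B-side helpers: need = {recipe: []} seed, then `for i, r in enumerate(recipes)` extending
-- need[r] with ingredients[i] filtered by the supply set, then repeated passes until stable.
def bSeed (recipes : List String) : PySem.Dict String (List String) :=
  recipes.foldl (fun d r => d.insert r []) PySem.Dict.empty

def bNeed (supply : PySem.Set String) (ingredients : List (List String))
    (rows : List (Int × String)) (d : PySem.Dict String (List String)) :
    PySem.Dict String (List String) :=
  rows.foldl (fun d p =>
    d.modify p.2 [] (fun l =>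
      l ++ (PySem.List.pyGetD ingredients p.1 []).filter
        (fun i => !(PySem.Set.contains supply i)))) d

def bPass (need : PySem.Dict String (List String)) (recipes : List String)
    (acc0 : PySem.Set String × Bool) : PySem.Set String × Bool :=
  recipes.foldl (fun acc r =>
    if !(PySem.Set.contains acc.1 r)
        && (need.getD r []).all (fun i => PySem.Set.contains acc.1 i)
    then (PySem.Set.add acc.1 r, true) else acc) acc0

-- the `while changed` loop; fuel `recipes.length + 1` suffices: every continuing pass grows the set
def bLoop (need : PySem.Dict String (List String)) (recipes : List String) :
    Nat → PySem.Set String → PySem.Set String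
  | 0, M => M
  | f+1, M =>
    let s := bPass need recipes (M, false)
    if s.2 then bLoop need recipes f s.1 else s.1

def solution_1449_1_1_alt (recipes : List String) (ingredients : List (List String))
    (supplies : List String) : List String :=
  let supply := PySem.Set.ofList supplies
  let need := bNeed supply ingredients (PySem.List.enumerate recipes 0) (bSeed recipes)
  let M := bLoop need recipes (recipes.length + 1) PySem.Set.empty
  recipes.filter (fun r => PySem.Set.contains M r)

-- ===== PRECONDITION & SPEC =====
-- Both A and B index ingredients[i] for every i < len(recipes), so both raise IndexError when
-- ingredients is shorter than recipes; exactly those inputs are excluded.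
def Pre_solution_1449_1_1 (recipes : List String) (ingredients : List (List String)) (supplies : List String) : Prop :=
  recipes.length ≤ ingredients.length
instance (recipes : List String) (ingredients : List (List String)) (supplies : List String) : Decidable (Pre_solution_1449_1_1 recipes ingredients supplies) := by unfold Pre_solution_1449_1_1; infer_instance

def pvWitness_solution_1449_1_1 : List String × List (List String) × List String :=
  (["cake"], [["flour"]], ["flour"])

def Spec_solution_1449_1_1 (recipes : List String) (ingredients : List (List String)) (supplies : List String) (out : List String) : Prop := out = solution_1449_1_1_alt recipes ingredients supplies
instance (recipes : List String) (ingredients : List (List String)) (supplies : List String) (out : List String) : Decidable (Spec_solution_1449_1_1 recipes ingredients supplies out) := by unfold Spec_solution_1449_1_1; infer_instance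

-- ===== CLAIM (what is proved, stated in full; the proofs are below) =====
def Claim_equal_solution_1449_1_1 : Prop := ∀ (recipes : List String) (ingredients : List (List String)) (supplies : List String), Dom_solution_1449_1_1 recipes ingredients supplies → Pre_solution_1449_1_1 recipes ingredients supplies → Spec_solution_1449_1_1 recipes ingredients supplies (solution_1449_1_1 recipes ingredients supplies)

-- ===== LEMMAS AND PROOFS =====

-- the merged list of non-supply ingredients required by recipe name c (row lists of c concatenated)
def Lneed (supply : PySem.Set String) (pairs : List (String × List String)) (c : String) : List String :=
  (pairs.filter (fun p => p.1 == c)).flatMap (fun p => p.2.filter (fun i => !(PySem.Set.contains supply i)))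

-- proof-side zip form of B's need-building fold (bNeed over enumerate equals this under Pre_)
def zNeed (supply : PySem.Set String) (pairs : List (String × List String))
    (d : PySem.Dict String (List String)) : PySem.Dict String (List String) :=
  pairs.foldl (fun d p =>
    d.modify p.1 [] (fun l => l ++ p.2.filter (fun i => !(PySem.Set.contains supply i)))) d

-- `Mk ns c`: recipe c is makeable, for ns = the merged needs table (some l ↔ c is a recipe needing l)
inductive Mk (ns : String → Option (List String)) : String → Prop
  | intro (c : String) (l : List String) (h : ns c = some l)
      (ih : ∀ i ∈ l, Mk ns i) : Mk ns c

-- an edge of A's graph: y is an entry of graph[c] (non-recipe needs are replaced by c itself)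
def AEdge (ns : String → Option (List String)) (c y : String) : Prop :=
  ∃ l, ns c = some l ∧ y ∈ l.map (fun i => if (ns i).isSome then i else c)

inductive Pth (ns : String → Option (List String)) : String → String → Prop
  | single {a b : String} : AEdge ns a b → Pth ns a b
  | cons {a b c : String} : AEdge ns a b → Pth ns b c → Pth ns a c

theorem mk_some {ns : String → Option (List String)} {c : String} (h : Mk ns c) : (ns c).isSome := by
  cases h with | intro c l hl _ => simp [hl]

theorem pth_snoc {ns : String → Option (List String)} {a b c : String}
    (h : Pth ns a b) (e : AEdge ns b c) : Pth ns a c := by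
  induction h with
  | single h1 => exact Pth.cons h1 (Pth.single e)
  | cons h1 _ ih => exact Pth.cons h1 (ih e)

theorem aedge_dest {ns : String → Option (List String)} {c y : String} (h : AEdge ns c y) :
    ∃ l, ns c = some l ∧ ((y ∈ l ∧ (ns y).isSome) ∨ (y = c ∧ ∃ i ∈ l, ns i = none)) := by
  obtain ⟨l, hl, hy⟩ := h
  rw [List.mem_map] at hy
  obtain ⟨i, hi, hiy⟩ := hy
  refine ⟨l, hl, ?_⟩
  by_cases hs : (ns i).isSome
  · left; simp only [hs, if_true] at hiy; subst hiy; exact ⟨hi, hs⟩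
  · right; simp only [hs, if_false] at hiy
    exact ⟨hiy.symm, i, hi, Option.not_isSome_iff_eq_none.mp hs⟩

theorem mk_edge {ns : String → Option (List String)} {c y : String}
    (h : Mk ns c) (e : AEdge ns c y) : Mk ns y := by
  obtain ⟨l, hl, hcase⟩ := aedge_dest e
  cases h with
  | intro c l' hl' ih =>
    rw [hl'] at hl; injection hl with hll; subst hll
    rcases hcase with ⟨hy, _⟩ | ⟨hyc, i, hi, hni⟩
    · exact ih y hy
    · exact absurd (mk_some (ih i hi)) (by simp [hni])

theorem no_cycle {ns : String → Option (List String)} {c : String} (h : Mk ns c) :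
    ¬ Pth ns c c := by
  induction h with
  | intro c l hl ih ih2 =>
    intro hp
    have hmk : Mk ns c := Mk.intro c l hl ih
    have edge_mem : ∀ y, AEdge ns c y → y ∈ l := by
      intro y he
      obtain ⟨l', hl', hcase⟩ := aedge_dest he
      rw [hl] at hl'; injection hl' with hll; subst hll
      rcases hcase with ⟨hy, _⟩ | ⟨hyc, i, hi, hni⟩
      · exact hy
      · exact absurd (mk_some (ih i hi)) (by simp [hni])
    cases hp with
    | single he => exact ih2 c (edge_mem c he) (Pth.single he)
    | cons he hp' => exact ih2 _ (edge_mem _ he) (pth_snoc hp' he)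

theorem edge_of_mem {ns : String → Option (List String)} {c : String} {l : List String}
    (hl : ns c = some l) {y : String}
    (hy : y ∈ l.map (fun i => if (ns i).isSome then i else c)) :
    AEdge ns c y ∧ (ns y).isSome := by
  refine ⟨⟨l, hl, hy⟩, ?_⟩
  rw [List.mem_map] at hy
  obtain ⟨i, _, hiy⟩ := hy
  by_cases hs : (ns i).isSome
  · simp only [hs, if_true] at hiy; subst hiy; exact hs
  · simp only [hs, if_false] at hiy; subst hiy; simp [hl]

theorem all_edges_iff {ns : String → Option (List String)} {c : String} {l : List String}
    (hl : ns c = some l) :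
    (∀ e ∈ l.map (fun i => if (ns i).isSome then i else c), Mk ns e) ↔ Mk ns c := by
  constructor
  · intro h
    by_cases hall : ∀ i ∈ l, (ns i).isSome
    · refine Mk.intro c l hl ?_
      intro i hi
      have := h i (by rw [List.mem_map]; exact ⟨i, hi, by simp [hall i hi]⟩)
      exact this
    · push_neg at hall
      obtain ⟨i, hi, hni⟩ := hall
      exact h c (by rw [List.mem_map]; exact ⟨i, hi, by simp [hni]⟩)
  · intro h e he
    exact mk_edge h ⟨l, hl, he⟩

-- memo invariant: every entry is a recipe; entries on the gray stack are False;
-- entries off the stack are the truth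
def MInv (ns : String → Option (List String)) (m : PySem.Dict String Bool) (st : List String) : Prop :=
  (∀ x b, m.get? x = some b → (ns x).isSome ∧ (x ∈ st → b = false) ∧ (x ∉ st → (b = true ↔ Mk ns x)))
  ∧ (∀ x ∈ st, m.contains x = true)

def missOf (K : List String) (m : PySem.Dict String Bool) : Nat :=
  (K.filter (fun k => !(m.contains k))).length

theorem miss_le (K : List String) (m : PySem.Dict String Bool) : missOf K m ≤ K.length :=
  List.length_filter_le _ _

theorem miss_mono {K : List String} {m m' : PySem.Dict String Bool}
    (h : ∀ x, m.contains x = true → m'.contains x = true) : missOf K m' ≤ missOf K m := by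
  unfold missOf
  induction K with
  | nil => simp
  | cons k K ih =>
    cases hk' : m'.contains k with
    | false =>
      cases hk : m.contains k with
      | true => exact absurd (h k hk) (by simp [hk'])
      | false =>
        rw [List.filter_cons_of_pos (by rw [hk']; rfl), List.filter_cons_of_pos (by rw [hk]; rfl)]
        simpa using ih
    | true =>
      rw [List.filter_cons_of_neg (by rw [hk']; simp)]
      cases hk : m.contains k with
      | true => rw [List.filter_cons_of_neg (by rw [hk]; simp)]; exact ih
      | false =>
        rw [List.filter_cons_of_pos (by rw [hk]; rfl)]
        exact le_trans ih (by simp)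

theorem miss_insert {K : List String} {m : PySem.Dict String Bool} {c : String} (b : Bool)
    (hnd : K.Nodup) (hc : c ∈ K) (hm : m.contains c = false) :
    missOf K (m.insert c b) + 1 = missOf K m := by
  unfold missOf
  induction K with
  | nil => simp at hc
  | cons k K ih =>
    rw [List.nodup_cons] at hnd
    by_cases hkc : k = c
    · subst hkc
      have h1 : (m.insert k b).contains k = true := by rw [PySem.Dict.contains_insert]; simp
      rw [List.filter_cons_of_neg (by rw [h1]; simp), List.filter_cons_of_pos (by rw [hm]; rfl)]
      have h2 : List.filter (fun x => !(m.insert k b).contains x) K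
          = List.filter (fun x => !m.contains x) K := by
        apply List.filter_congr
        intro x hx
        have hxk : (x == k) = false := beq_eq_false_iff_ne.mpr (fun hh => hnd.1 (hh ▸ hx))
        rw [PySem.Dict.contains_insert, hxk]
        simp
      rw [h2]
      simp
    · have hcK : c ∈ K := by
        rcases List.mem_cons.mp hc with h | h
        · exact absurd h.symm hkc
        · exact h
      have hbeq : (k == c) = false := beq_eq_false_iff_ne.mpr hkc
      have hkins : (m.insert c b).contains k = m.contains k := by
        rw [PySem.Dict.contains_insert, hbeq]; simp
      have hrec := ih hnd.2 hcK
      cases hk : m.contains k with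
      | true =>
        rw [List.filter_cons_of_neg (by rw [hkins, hk]; simp),
           List.filter_cons_of_neg (by rw [hk]; simp)]
        exact hrec
      | false =>
        rw [List.filter_cons_of_pos (by rw [hkins, hk]; rfl),
           List.filter_cons_of_pos (by rw [hk]; rfl)]
        simp only [List.length_cons]
        omega

-- the inner fold of dfsA over the edge list, given the induction hypothesis for fuel f
theorem dfs_fold (g : PySem.Dict String (List String)) (ns : String → Option (List String))
    (K : List String) (f : Nat) (st' : List String)
    (IH : ∀ c m, MInv ns m st' → (∀ x ∈ st', Pth ns x c) → (ns c).isSome → missOf K m < f →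
        ((dfsA g f c m).1 = true ↔ Mk ns c) ∧ MInv ns (dfsA g f c m).2 st' ∧
        (∀ x, m.contains x = true → (dfsA g f c m).2.contains x = true) ∧
        missOf K (dfsA g f c m).2 ≤ missOf K m) :
    ∀ (es : List String) (bs : List Bool) (m : PySem.Dict String Bool),
      (∀ e ∈ es, (ns e).isSome ∧ ∀ x ∈ st', Pth ns x e) → MInv ns m st' → missOf K m < f →
      ((es.foldl (fun (acc : List Bool × PySem.Dict String Bool) i =>
          (acc.1 ++ [(dfsA g f i acc.2).1], (dfsA g f i acc.2).2)) (bs, m)).1.all id = true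
        ↔ (bs.all id = true ∧ ∀ e ∈ es, Mk ns e)) ∧
      MInv ns (es.foldl (fun (acc : List Bool × PySem.Dict String Bool) i =>
          (acc.1 ++ [(dfsA g f i acc.2).1], (dfsA g f i acc.2).2)) (bs, m)).2 st' ∧
      (∀ x, m.contains x = true → (es.foldl (fun (acc : List Bool × PySem.Dict String Bool) i =>
          (acc.1 ++ [(dfsA g f i acc.2).1], (dfsA g f i acc.2).2)) (bs, m)).2.contains x = true) ∧
      missOf K (es.foldl (fun (acc : List Bool × PySem.Dict String Bool) i =>
          (acc.1 ++ [(dfsA g f i acc.2).1], (dfsA g f i acc.2).2)) (bs, m)).2 ≤ missOf K m := by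
  intro es
  induction es with
  | nil =>
    intro bs m _ hminv _
    exact ⟨by simp, hminv, fun x hx => hx, le_refl _⟩
  | cons e es ih =>
    intro bs m hes hminv hmiss
    have he := hes e (List.mem_cons_self)
    obtain ⟨hiff, hminv2, hcont2, hmiss2⟩ := IH e m hminv he.2 he.1 hmiss
    simp only [List.foldl_cons]
    obtain ⟨hiff3, hminv3, hcont3, hmiss3⟩ := ih (bs ++ [(dfsA g f e m).1]) (dfsA g f e m).2
      (fun e' he' => hes e' (List.mem_cons_of_mem e he')) hminv2 (lt_of_le_of_lt hmiss2 hmiss)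
    refine ⟨?_, hminv3, fun x hx => hcont3 x (hcont2 x hx), le_trans hmiss3 hmiss2⟩
    rw [hiff3]
    simp only [List.all_append, List.all_cons, List.all_nil, Bool.and_true, Bool.and_eq_true,
      List.forall_mem_cons, id_eq]
    constructor
    · rintro ⟨⟨h1, h2⟩, h3⟩; exact ⟨h1, hiff.mp h2, h3⟩
    · rintro ⟨h1, h2, h3⟩; exact ⟨⟨h1, hiff.mpr h2⟩, h3⟩

-- the main DFS correctness: given enough fuel it returns exactly "is makeable" and keeps the invariant
theorem dfs_main (g : PySem.Dict String (List String)) (ns : String → Option (List String))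
    (K : List String)
    (Hg : ∀ c l, ns c = some l → g.getD c [] = l.map (fun i => if (ns i).isSome then i else c))
    (HK : ∀ x, (ns x).isSome ↔ x ∈ K) (HKnd : K.Nodup) :
    ∀ (f : Nat) (c : String) (m : PySem.Dict String Bool) (st : List String),
      MInv ns m st → (∀ x ∈ st, Pth ns x c) → (ns c).isSome → missOf K m < f →
      ((dfsA g f c m).1 = true ↔ Mk ns c) ∧ MInv ns (dfsA g f c m).2 st ∧
      (∀ x, m.contains x = true → (dfsA g f c m).2.contains x = true) ∧
      missOf K (dfsA g f c m).2 ≤ missOf K m := by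
  intro f
  induction f with
  | zero => intro c m st _ _ _ hmiss; exact absurd hmiss (Nat.not_lt_zero _)
  | succ f ihf =>
    intro c m st hminv hstp hns hmiss
    cases hmc : m.get? c with
    | some b =>
      have hred : dfsA g (f+1) c m = (b, m) := by simp only [dfsA, hmc]
      rw [hred]
      obtain ⟨hsome', hgray, hclosed⟩ := hminv.1 c b hmc
      refine ⟨?_, hminv, fun x hx => hx, le_refl _⟩
      by_cases hst : c ∈ st
      · rw [hgray hst]
        constructor
        · intro h; cases h
        · intro hmk; exact absurd (hstp c hst) (no_cycle hmk)
      · exact hclosed hst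
    | none =>
      have hcont : m.contains c = false := by
        rw [PySem.Dict.contains_eq_isSome_get?, hmc]; rfl
      have hcK : c ∈ K := (HK c).mp hns
      have hcst : c ∉ st := fun h => by
        have h2 := hminv.2 c h; rw [hcont] at h2; cases h2
      obtain ⟨l, hl⟩ := Option.isSome_iff_exists.mp hns
      have hes : g.getD c [] = l.map (fun i => if (ns i).isSome then i else c) := Hg c l hl
      have hminv1 : MInv ns (m.insert c false) (st ++ [c]) := by
        constructor
        · intro x b hx
          rw [PySem.Dict.get?_insert] at hx
          by_cases hxc : x = c
          · subst hxc
            rw [if_pos rfl] at hx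
            injection hx with hb
            refine ⟨hns, fun _ => hb.symm, fun hmem => absurd (by simp) hmem⟩
          · rw [if_neg hxc] at hx
            obtain ⟨h1, h2, h3⟩ := hminv.1 x b hx
            refine ⟨h1, fun hmem => h2 ?_, fun hmem => h3 ?_⟩
            · rcases List.mem_append.mp hmem with h | h
              · exact h
              · simp at h; exact absurd h hxc
            · intro hx2; exact hmem (List.mem_append.mpr (Or.inl hx2))
        · intro x hx
          rcases List.mem_append.mp hx with h | h
          · rw [PySem.Dict.contains_insert, hminv.2 x h]; simp
          · simp at h; subst h; rw [PySem.Dict.contains_insert]; simp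
      have hmiss1 : missOf K (m.insert c false) < f := by
        have h2 := miss_insert false HKnd hcK hcont
        omega
      have hpth : ∀ e ∈ l.map (fun i => if (ns i).isSome then i else c),
          (ns e).isSome ∧ ∀ x ∈ st ++ [c], Pth ns x e := by
        intro e he
        obtain ⟨hedge, hsome2⟩ := edge_of_mem hl he
        refine ⟨hsome2, fun x hx => ?_⟩
        rcases List.mem_append.mp hx with h | h
        · exact pth_snoc (hstp x h) hedge
        · simp at h; subst h; exact Pth.single hedge
      obtain ⟨hiffF, hminvF, hcontF, hmissF⟩ := dfs_fold g ns K f (st ++ [c])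
        (fun c' m' a b c'' d => ihf c' m' (st ++ [c]) a b c'' d)
        (l.map (fun i => if (ns i).isSome then i else c)) [] (m.insert c false)
        hpth hminv1 hmiss1
      simp only [dfsA, hmc, hes]
      have hg1 : ((l.map (fun i => if (ns i).isSome then i else c)).foldl
          (fun (acc : List Bool × PySem.Dict String Bool) i =>
            (acc.1 ++ [(dfsA g f i acc.2).1], (dfsA g f i acc.2).2))
          ([], m.insert c false)).1.all id = true ↔ Mk ns c := by
        rw [hiffF]
        constructor
        · rintro ⟨_, h⟩; exact (all_edges_iff hl).mp h
        · intro h; exact ⟨rfl, (all_edges_iff hl).mpr h⟩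
      refine ⟨hg1, ?_, ?_, ?_⟩
      · constructor
        · intro x b hx
          rw [PySem.Dict.get?_insert] at hx
          by_cases hxc : x = c
          · subst hxc
            rw [if_pos rfl] at hx
            injection hx with hb
            exact ⟨hns, fun hmem => absurd hmem hcst, fun _ => hb ▸ hg1⟩
          · rw [if_neg hxc] at hx
            obtain ⟨h1, h2, h3⟩ := hminvF.1 x b hx
            refine ⟨h1, fun hmem => h2 (List.mem_append.mpr (Or.inl hmem)), fun hmem => h3 ?_⟩
            intro hx2
            rcases List.mem_append.mp hx2 with h | h
            · exact hmem h
            · simp at h; exact hxc h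
        · intro x hx
          have h1 : (m.insert c false).contains x = true := by
            rw [PySem.Dict.contains_insert, hminv.2 x hx]; simp
          rw [PySem.Dict.contains_insert, hcontF x h1]; simp
      · intro x hx
        have h1 : (m.insert c false).contains x = true := by
          rw [PySem.Dict.contains_insert, hx]; simp
        rw [PySem.Dict.contains_insert, hcontF x h1]; simp
      · apply miss_mono
        intro x hx
        have h1 : (m.insert c false).contains x = true := by
          rw [PySem.Dict.contains_insert, hx]; simp
        rw [PySem.Dict.contains_insert, hcontF x h1]; simp

-- A's top-level loop: collects exactly the recipes decided makeable
theorem topA (g : PySem.Dict String (List String)) (ns : String → Option (List String))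
    (K : List String) (F : Nat)
    (Hg : ∀ c l, ns c = some l → g.getD c [] = l.map (fun i => if (ns i).isSome then i else c))
    (HK : ∀ x, (ns x).isSome ↔ x ∈ K) (HKnd : K.Nodup) (HF : K.length < F)
    (q : String → Bool) :
    ∀ (rs : List String) (out : List String) (m : PySem.Dict String Bool),
      (∀ r ∈ rs, (ns r).isSome ∧ (q r = true ↔ Mk ns r)) → MInv ns m [] →
      (rs.foldl (fun (acc : List String × PySem.Dict String Bool) r =>
        (if (dfsA g F r acc.2).1 then acc.1 ++ [r] else acc.1, (dfsA g F r acc.2).2)) (out, m)).1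
        = out ++ rs.filter q := by
  intro rs
  induction rs with
  | nil => intro out m _ _; simp
  | cons r rs ih =>
    intro out m hq hminv
    have hr := hq r (List.mem_cons_self)
    obtain ⟨hiff, hminv2, _, _⟩ := dfs_main g ns K Hg HK HKnd F r m [] hminv
      (by intro x hx; cases hx) hr.1 (lt_of_le_of_lt (miss_le K m) HF)
    have hbq : (dfsA g F r m).1 = q r := by
      cases hqr : q r with
      | true => exact hiff.mpr (hr.2.mp hqr)
      | false =>
        cases hdd : (dfsA g F r m).1 with
        | false => rfl
        | true =>
          have h2 := hr.2.mpr (hiff.mp hdd)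
          rw [hqr] at h2; cases h2
    simp only [List.foldl_cons, List.filter_cons]
    rw [ih (if (dfsA g F r m).1 = true then out ++ [r] else out) (dfsA g F r m).2
        (fun x hx => hq x (List.mem_cons_of_mem r hx)) hminv2]
    rw [hbq]
    cases hqr : q r with
    | true => simp
    | false => simp

-- ===== B-side lemmas =====

-- B's enumerate-indexed need fold equals the zip form whenever the index never runs past ingredients
theorem bNeed_eq_z (supply : PySem.Set String) (ingredients : List (List String)) :
    ∀ (rs : List String) (s : Nat) (d : PySem.Dict String (List String)),
    s + rs.length ≤ ingredients.length →
    bNeed supply ingredients (PySem.List.enumerate rs (s : Int)) d =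
      zNeed supply (rs.zip (ingredients.drop s)) d := by
  intro rs
  induction rs with
  | nil =>
    intro s d _
    simp [bNeed, zNeed, PySem.List.enumerate_nil]
  | cons r rs ih =>
    intro s d hlen
    have hs : s < ingredients.length := by
      simp only [List.length_cons] at hlen
      omega
    rw [PySem.List.enumerate_cons]
    unfold bNeed
    simp only [List.foldl_cons]
    have hpg : PySem.List.pyGetD ingredients ((s : Nat) : Int) [] = ingredients[s] := by
      rw [PySem.List.pyGetD_natCast]
      exact List.getD_eq_getElem ingredients [] hs
    rw [hpg]
    rw [List.drop_eq_getElem_cons hs, List.zip_cons_cons]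
    unfold zNeed
    simp only [List.foldl_cons]
    have hcast : ((s : Nat) : Int) + 1 = (((s + 1 : Nat)) : Int) := by push_cast; ring
    rw [hcast]
    have := ih (s + 1)
      (d.modify r [] (fun l =>
        l ++ ingredients[s].filter (fun i => !(PySem.Set.contains supply i))))
      (by simp only [List.length_cons] at hlen; omega)
    unfold bNeed zNeed at this
    exact this

theorem pass_spec (nd : PySem.Dict String (List String)) (recipes : List String)
    (Hsome : ∀ x, ((fun c => nd.get? c) x).isSome ↔ x ∈ recipes) :
    ∀ (rs : List String) (M : PySem.Set String) (ch : Bool),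
      (∀ r ∈ rs, r ∈ recipes) → M.Nodup →
      (∀ x ∈ M, Mk (fun c => nd.get? c) x) → (∀ x ∈ M, x ∈ recipes) →
      ∃ ext : List String,
        (rs.foldl (fun (acc : PySem.Set String × Bool) r =>
          if !(PySem.Set.contains acc.1 r)
              && (nd.getD r []).all (fun i => PySem.Set.contains acc.1 i)
          then (PySem.Set.add acc.1 r, true) else acc) (M, ch)) = (M ++ ext, ch || !ext.isEmpty) ∧
        (M ++ ext).Nodup ∧ (∀ x ∈ ext, Mk (fun c => nd.get? c) x) ∧ (∀ x ∈ ext, x ∈ recipes) ∧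
        ((ch = false ∧ ext = []) → ∀ r ∈ rs, (∀ i ∈ nd.getD r [], i ∈ M) → r ∈ M) := by
  intro rs
  induction rs with
  | nil =>
    intro M ch _ hnd _ _
    refine ⟨[], by simp, by simpa using hnd, ?_, ?_, ?_⟩
    · intro x hx; cases hx
    · intro x hx; cases hx
    · intro _ r hr; cases hr
  | cons r rs ih =>
    intro M ch hrs hnd hsound hsub
    have hrrec := hrs r List.mem_cons_self
    simp only [List.foldl_cons]
    by_cases hcond : (!(PySem.Set.contains M r)
        && (nd.getD r []).all (fun i => PySem.Set.contains M i)) = true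
    · rw [if_pos hcond]
      obtain ⟨hc1, hc2⟩ := Bool.and_eq_true_iff.mp hcond
      have hrM : r ∉ M := by
        intro hmem
        have : PySem.Set.contains M r = true := by simp [PySem.Set.contains, hmem]
        rw [this] at hc1; cases hc1
      have hcontf : PySem.Set.contains M r = false := by
        cases h : PySem.Set.contains M r
        · rfl
        · rw [h] at hc1; cases hc1
      have hadd : PySem.Set.add M r = M ++ [r] := by
        simp [PySem.Set.add, hcontf, hrM]
      have hlr : nd.get? r = some (nd.getD r []) := by
        obtain ⟨v, hv⟩ := Option.isSome_iff_exists.mp ((Hsome r).mpr hrrec)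
        have hv' : nd.get? r = some v := hv
        rw [hv', PySem.Dict.getD_eq_get?_getD, hv']
        rfl
      have hmkr : Mk (fun c => nd.get? c) r := by
        refine Mk.intro r (nd.getD r []) hlr ?_
        intro i hi
        rw [List.all_eq_true] at hc2
        have := hc2 i hi
        have hiM : i ∈ M := by simpa [PySem.Set.contains] using this
        exact hsound i hiM
      have hndMr : (M ++ [r]).Nodup := by
        refine List.Nodup.append hnd (List.nodup_singleton r) ?_
        intro x hx hx2
        rw [List.mem_singleton] at hx2
        subst hx2
        exact hrM hx
      obtain ⟨ext', hfold, hnd', hsMk, hsRec, _⟩ := ih (M ++ [r]) true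
        (fun x hx => hrs x (List.mem_cons_of_mem r hx)) hndMr
        (by
          intro x hx
          rcases List.mem_append.mp hx with h | h
          · exact hsound x h
          · simp at h; subst h; exact hmkr)
        (by
          intro x hx
          rcases List.mem_append.mp hx with h | h
          · exact hsub x h
          · simp at h; subst h; exact hrrec)
      refine ⟨r :: ext', ?_, ?_, ?_, ?_, ?_⟩
      · rw [hadd, hfold]
        simp [List.append_assoc]
      · simpa [List.append_assoc] using hnd'
      · intro x hx
        rcases List.mem_cons.mp hx with h | h
        · subst h; exact hmkr
        · exact hsMk x h
      · intro x hx
        rcases List.mem_cons.mp hx with h | h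
        · subst h; exact hrrec
        · exact hsRec x h
      · rintro ⟨_, h⟩; cases h
    · rw [if_neg hcond]
      obtain ⟨ext, hfold, hnd', hsMk, hsRec, hstab⟩ := ih M ch
        (fun x hx => hrs x (List.mem_cons_of_mem r hx)) hnd hsound hsub
      refine ⟨ext, hfold, hnd', hsMk, hsRec, ?_⟩
      rintro ⟨hch, hext⟩ r' hr' hneed
      rcases List.mem_cons.mp hr' with h | h
      · subst h
        by_cases hrm : r' ∈ M
        · exact hrm
        · exfalso
          apply hcond
          have h1 : PySem.Set.contains M r' = false := by
            simp [PySem.Set.contains, hrm]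
          have h2 : (nd.getD r' []).all (fun i => PySem.Set.contains M i) = true := by
            rw [List.all_eq_true]
            intro i hi
            simp only [PySem.Set.contains]
            simp [hneed i hi]
          rw [h1, h2]
          rfl
      · exact hstab ⟨hch, hext⟩ r' h hneed

theorem loop_spec (nd : PySem.Dict String (List String)) (recipes : List String)
    (Hsome : ∀ x, ((fun c => nd.get? c) x).isSome ↔ x ∈ recipes) :
    ∀ (f : Nat) (M : PySem.Set String),
      M.Nodup → (∀ x ∈ M, Mk (fun c => nd.get? c) x) → (∀ x ∈ M, x ∈ recipes) →
      (PySem.List.dedup recipes).length - M.length < f →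
      (∀ x ∈ bLoop nd recipes f M, Mk (fun c => nd.get? c) x) ∧
      (∀ r ∈ recipes, (∀ i ∈ nd.getD r [], i ∈ bLoop nd recipes f M) → r ∈ bLoop nd recipes f M) := by
  intro f
  induction f with
  | zero => intro M _ _ _ hf; exact absurd hf (Nat.not_lt_zero _)
  | succ f ihf =>
    intro M hnd hsound hsub hf
    obtain ⟨ext, hfold, hnd', hsMk, hsRec, hstab⟩ :=
      pass_spec nd recipes Hsome recipes M false (fun r hr => hr) hnd hsound hsub
    simp only [bLoop, bPass]
    rw [hfold]
    cases ext with
    | nil =>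
      simp only [List.append_nil, List.isEmpty_nil, Bool.not_true, Bool.or_false]
      constructor
      · exact hsound
      · exact hstab ⟨rfl, rfl⟩
    | cons e ext' =>
      simp only [List.isEmpty_cons, Bool.not_false, Bool.or_true, if_pos rfl]
      have hsound2 : ∀ x ∈ M ++ e :: ext', Mk (fun c => nd.get? c) x := by
        intro x hx
        rcases List.mem_append.mp hx with h | h
        · exact hsound x h
        · exact hsMk x h
      have hsub2 : ∀ x ∈ M ++ e :: ext', x ∈ recipes := by
        intro x hx
        rcases List.mem_append.mp hx with h | h
        · exact hsub x h
        · exact hsRec x h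
      have hlen : (M ++ e :: ext').length ≤ (PySem.List.dedup recipes).length := by
        refine (hnd'.subperm ?_).length_le
        intro x hx
        exact (PySem.List.mem_dedup recipes x).mpr (hsub2 x hx)
      have hfuel : (PySem.List.dedup recipes).length - (M ++ e :: ext').length < f := by
        have : (M ++ e :: ext').length = M.length + (e :: ext').length := by simp
        simp only [List.length_cons] at this
        omega
      exact ihf (M ++ e :: ext') hnd' hsound2 hsub2 hfuel

theorem mk_mem_final (nd : PySem.Dict String (List String)) (recipes : List String)
    (M' : List String)
    (Hsome : ∀ x, ((fun c => nd.get? c) x).isSome ↔ x ∈ recipes)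
    (Hstab : ∀ r ∈ recipes, (∀ i ∈ nd.getD r [], i ∈ M') → r ∈ M') :
    ∀ x, Mk (fun c => nd.get? c) x → x ∈ M' := by
  intro x hmk
  induction hmk with
  | intro c l hl _ ih2 =>
    have hcrec : c ∈ recipes := (Hsome c).mp (by simp only [hl]; rfl)
    have hld : nd.getD c [] = l := by
      rw [PySem.Dict.getD_eq_get?_getD, hl]
      rfl
    refine Hstab c hcrec ?_
    rw [hld]
    exact fun i hi => ih2 i hi

-- ===== dict characterization lemmas =====

theorem foldl_insert_nil_get? : ∀ (rs : List String) (d : PySem.Dict String (List String)) (c : String),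
    (rs.foldl (fun d r => d.insert r []) d).get? c = if c ∈ rs then some [] else d.get? c := by
  intro rs
  induction rs with
  | nil => simp
  | cons r rs ih =>
    intro d c
    simp only [List.foldl_cons, ih]
    by_cases hc : c ∈ rs
    · simp [hc, List.mem_cons, hc]
    · rw [PySem.Dict.get?_insert]
      by_cases hcr : c = r <;> simp [hc, hcr]

theorem getD_foldl_modify_appendF {β : Type} (F : String × β → List String) :
    ∀ (l : List (String × β)) (d : PySem.Dict String (List String)) (c : String),
    ((l.foldl (fun d p => d.modify p.1 [] (fun v => v ++ F p)) d).getD c []) =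
      d.getD c [] ++ (l.filter (fun p => p.1 == c)).flatMap F := by
  intro l
  induction l with
  | nil => simp
  | cons p l ih =>
    intro d c
    simp only [List.foldl_cons, ih, List.filter_cons]
    by_cases hpc : p.1 = c
    · subst hpc
      rw [PySem.Dict.getD_modify_self]
      simp [List.append_assoc]
    · have h1 : (d.modify p.1 [] (fun v => v ++ F p)).getD c [] = d.getD c [] := by
        rw [PySem.Dict.getD_modify]
        simp [Ne.symm hpc]
      rw [h1]
      simp [hpc]

theorem contains_foldl_modifyF {β : Type} (F : String × β → List String) :
    ∀ (l : List (String × β)) (d : PySem.Dict String (List String)) (c : String),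
    ((l.foldl (fun d p => d.modify p.1 [] (fun v => v ++ F p)) d).contains c) =
      (d.contains c || l.any (fun p => p.1 == c)) := by
  intro l
  induction l with
  | nil => simp
  | cons p l ih =>
    intro d c
    simp only [List.foldl_cons, ih, List.any_cons]
    rw [PySem.Dict.contains_modify]
    by_cases hpc : c = p.1
    · subst hpc; simp
    · have h1 : (c == p.1) = false := beq_eq_false_iff_ne.mpr hpc
      have h2 : (p.1 == c) = false := beq_eq_false_iff_ne.mpr (Ne.symm hpc)
      rw [h1, h2]
      cases d.contains c <;> cases l.any (fun p => p.1 == c) <;> simp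

theorem zNeed_get? (supply : PySem.Set String) (recipes : List String)
    (ingredients : List (List String)) (c : String) :
    (zNeed supply (recipes.zip ingredients) (bSeed recipes)).get? c =
      if c ∈ recipes then some (Lneed supply (recipes.zip ingredients) c) else none := by
  have hcont := contains_foldl_modifyF
    (fun p : String × List String => p.2.filter (fun i => !(PySem.Set.contains supply i)))
    (recipes.zip ingredients) (bSeed recipes) c
  beta_reduce at hcont
  have hgetD := getD_foldl_modify_appendF
    (fun p : String × List String => p.2.filter (fun i => !(PySem.Set.contains supply i)))
    (recipes.zip ingredients) (bSeed recipes) c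
  beta_reduce at hgetD
  have hseed : (bSeed recipes).get? c = if c ∈ recipes then some [] else none := by
    unfold bSeed
    rw [foldl_insert_nil_get? recipes PySem.Dict.empty c]
    rw [PySem.Dict.get?_empty]
  unfold zNeed
  by_cases hc : c ∈ recipes
  · have hseedc : (bSeed recipes).get? c = some [] := by rw [hseed, if_pos hc]
    have hcont2 : ((recipes.zip ingredients).foldl (fun d p =>
        d.modify p.1 [] (fun l => l ++ p.2.filter (fun i => !(PySem.Set.contains supply i))))
        (bSeed recipes)).contains c = true := by
      rw [hcont]
      have h1 : (bSeed recipes).contains c = true := by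
        rw [PySem.Dict.contains_eq_isSome_get?, hseedc]
        rfl
      rw [h1]
      rfl
    rw [PySem.Dict.contains_eq_isSome_get?] at hcont2
    obtain ⟨v, hv⟩ := Option.isSome_iff_exists.mp hcont2
    rw [hv, if_pos hc]
    have hvD : ((recipes.zip ingredients).foldl (fun d p =>
        d.modify p.1 [] (fun l => l ++ p.2.filter (fun i => !(PySem.Set.contains supply i))))
        (bSeed recipes)).getD c [] = v := by
      rw [PySem.Dict.getD_eq_get?_getD, hv]
      rfl
    have hseedD : (bSeed recipes).getD c [] = [] := by
      rw [PySem.Dict.getD_eq_get?_getD, hseedc]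
      rfl
    rw [hvD, hseedD] at hgetD
    simp only [List.nil_append] at hgetD
    rw [hgetD]
    simp [Lneed]
  · have hcont2 : ((recipes.zip ingredients).foldl (fun d p =>
        d.modify p.1 [] (fun l => l ++ p.2.filter (fun i => !(PySem.Set.contains supply i))))
        (bSeed recipes)).contains c = false := by
      rw [hcont]
      have h1 : (bSeed recipes).contains c = false := by
        rw [PySem.Dict.contains_eq_isSome_get?, hseed, if_neg hc]
        rfl
      rw [h1]
      simp only [Bool.false_or]
      rw [List.any_eq_false]
      intro p hp
      have hprec : p.1 ∈ recipes := by
        obtain ⟨a, b, hab⟩ : ∃ a b, p = (a, b) := ⟨p.1, p.2, rfl⟩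
        subst hab
        exact (List.of_mem_zip hp).1
      simp only [beq_iff_eq]
      intro hpc
      exact hc (hpc ▸ hprec)
    rw [if_neg hc]
    rw [PySem.Dict.contains_eq_isSome_get?] at hcont2
    exact Option.not_isSome_iff_eq_none.mp (by rw [hcont2]; exact Bool.false_ne_true)

def BLf (supply : PySem.Set String) (recipes : List String) (p : String × List String) :
    List (String × String) :=
  (p.2.filter (fun i => !(PySem.Set.contains supply i))).map
    (fun i => (p.1, if recipes.contains i then i else p.1))

theorem aBuild_inner (supply : PySem.Set String) (recipes : List String) :
    ∀ (ing : List String) (r : String) (d : PySem.Dict String (List String)),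
    r ∈ recipes → (∀ x, d.contains x = recipes.contains x) →
    (ing.foldl (fun d2 ingr =>
        if PySem.Set.contains supply ingr then d2
        else d2.modify r [] (fun l => l ++ [if d2.contains ingr then ingr else r])) d)
      = (BLf supply recipes (r, ing)).foldl (fun d q => d.modify q.1 [] (fun v => v ++ [q.2])) d
    ∧ (∀ x, ((ing.foldl (fun d2 ingr =>
        if PySem.Set.contains supply ingr then d2
        else d2.modify r [] (fun l => l ++ [if d2.contains ingr then ingr else r])) d)).contains x = recipes.contains x) := by
  intro ing
  induction ing with
  | nil =>
    intro r d _ hinv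
    exact ⟨by simp [BLf], hinv⟩
  | cons i ing ih =>
    intro r d hr hinv
    by_cases hsup : PySem.Set.contains supply i = true
    · have hmemi : i ∈ supply := by simpa [PySem.Set.contains] using hsup
      have hbl : BLf supply recipes (r, i :: ing) = BLf supply recipes (r, ing) := by
        simp [BLf, List.filter_cons, hmemi]
      constructor
      · simp only [List.foldl_cons, if_pos hsup]
        rw [hbl]
        exact (ih r d hr hinv).1
      · intro x
        simp only [List.foldl_cons, if_pos hsup]
        exact (ih r d hr hinv).2 x
    · have hsupf : PySem.Set.contains supply i = false := by
        cases h : PySem.Set.contains supply i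
        · rfl
        · exact absurd h hsup
      have hmem : i ∉ supply := by
        intro hm
        exact hsup (by simpa [PySem.Set.contains] using hm)
      have hbl : BLf supply recipes (r, i :: ing)
          = (r, if recipes.contains i then i else r) :: BLf supply recipes (r, ing) := by
        simp [BLf, List.filter_cons, hmem]
      have hrc : recipes.contains r = true := List.contains_iff_mem.mpr hr
      have hinv2 : ∀ x, (d.modify r [] (fun l =>
          l ++ [if recipes.contains i then i else r])).contains x = recipes.contains x := by
        intro x
        rw [PySem.Dict.contains_modify]
        by_cases hxr : x = r
        · subst hxr
          rw [hrc]
          simp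
        · have hb : (x == r) = false := beq_eq_false_iff_ne.mpr hxr
          rw [hb, hinv x]
          simp
      have hmain := ih r (d.modify r [] (fun l => l ++ [if recipes.contains i then i else r]))
        hr hinv2
      constructor
      · simp only [List.foldl_cons, if_neg hsup]
        rw [hbl]
        simp only [List.foldl_cons]
        rw [hinv i]
        exact hmain.1
      · intro x
        simp only [List.foldl_cons, if_neg hsup]
        rw [hinv i]
        exact hmain.2 x

theorem aBuild_eq (supply : PySem.Set String) (recipes : List String)
    (ingredients : List (List String)) :
    ∀ (rs : List String) (s : Nat) (d : PySem.Dict String (List String)),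
    s + rs.length ≤ ingredients.length → (∀ x, d.contains x = recipes.contains x) →
    (∀ r ∈ rs, r ∈ recipes) →
    aBuild supply ingredients (PySem.List.enumerate rs (s : Int)) d =
      ((rs.zip (ingredients.drop s)).flatMap (BLf supply recipes)).foldl
        (fun d q => d.modify q.1 [] (fun v => v ++ [q.2])) d := by
  intro rs
  induction rs with
  | nil =>
    intro s d _ _ _
    simp [aBuild, PySem.List.enumerate_nil]
  | cons r rs ih =>
    intro s d hlen hinv hrs
    have hs : s < ingredients.length := by
      simp only [List.length_cons] at hlen
      omega
    rw [PySem.List.enumerate_cons]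
    unfold aBuild
    simp only [List.foldl_cons]
    have hpg : PySem.List.pyGetD ingredients ((s : Nat) : Int) [] = ingredients[s] := by
      rw [PySem.List.pyGetD_natCast]
      exact List.getD_eq_getElem ingredients [] hs
    rw [hpg]
    obtain ⟨hin, hinv2⟩ := aBuild_inner supply recipes ingredients[s] r d
      (hrs r List.mem_cons_self) hinv
    rw [hin]
    rw [List.drop_eq_getElem_cons hs, List.zip_cons_cons, List.flatMap_cons, List.foldl_append]
    rw [hin] at hinv2
    have hcast : ((s : Nat) : Int) + 1 = (((s + 1 : Nat)) : Int) := by push_cast; ring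
    rw [hcast]
    have := ih (s + 1)
      ((BLf supply recipes (r, ingredients[s])).foldl
        (fun d q => d.modify q.1 [] (fun v => v ++ [q.2])) d)
      (by simp only [List.length_cons] at hlen; omega) hinv2
      (fun x hx => hrs x (List.mem_cons_of_mem r hx))
    unfold aBuild at this
    exact this

theorem Lneed_cons (supply : PySem.Set String) (p : String × List String)
    (ps : List (String × List String)) (c : String) :
    Lneed supply (p :: ps) c =
      if (p.1 == c) = true then
        p.2.filter (fun i => !(PySem.Set.contains supply i)) ++ Lneed supply ps c
      else Lneed supply ps c := by
  unfold Lneed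
  rw [List.filter_cons]
  split
  · rw [List.flatMap_cons]
  · rfl

theorem flat_filter_map (supply : PySem.Set String) (recipes : List String) :
    ∀ (ps : List (String × List String)) (c : String),
    (((ps.flatMap (BLf supply recipes)).filter (fun q => q.1 == c)).map (fun q => q.2)) =
      (Lneed supply ps c).map (fun i => if recipes.contains i then i else c) := by
  intro ps
  induction ps with
  | nil => intro c; simp [Lneed]
  | cons p ps ih =>
    intro c
    simp only [List.flatMap_cons, List.filter_append, List.map_append, ih, Lneed_cons]
    by_cases hpc : p.1 = c
    · subst hpc
      have hkeep : (BLf supply recipes p).filter (fun q => q.1 == p.1) = BLf supply recipes p := by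
        rw [List.filter_eq_self]
        intro q hq
        obtain ⟨i, _, hqe⟩ : ∃ a, (a ∈ p.2 ∧ a ∉ supply) ∧ (p.1, if a ∈ recipes then a else p.1) = q := by
          simpa [BLf, PySem.Set.contains] using hq
        rw [← hqe]
        simp
      rw [hkeep, if_pos (by simp)]
      rw [List.map_append]
      congr 1
      obtain ⟨p1, p2, hp⟩ : ∃ a b, p = (a, b) := ⟨p.1, p.2, rfl⟩
      subst hp
      simp [BLf, List.map_map, Function.comp]
    · have hkill : (BLf supply recipes p).filter (fun q => q.1 == c) = [] := by
        rw [List.filter_eq_nil_iff]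
        intro q hq
        obtain ⟨i, _, hqe⟩ : ∃ a, (a ∈ p.2 ∧ a ∉ supply) ∧ (p.1, if a ∈ recipes then a else p.1) = q := by
          simpa [BLf, PySem.Set.contains] using hq
        rw [← hqe]
        simp only [beq_iff_eq]
        exact hpc
      rw [hkill, if_neg (by simp [hpc])]
      simp

theorem aGraph_get? (supply : PySem.Set String) (recipes : List String)
    (ingredients : List (List String)) (hpre : recipes.length ≤ ingredients.length) (c : String) :
    (aBuild supply ingredients (PySem.List.enumerate recipes 0) (aSeed recipes)).get? c =
      if c ∈ recipes then
        some ((Lneed supply (recipes.zip ingredients) c).map (fun i => if recipes.contains i then i else c))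
      else none := by
  have hseedinv : ∀ x, (aSeed recipes).contains x = recipes.contains x := by
    intro x
    rw [PySem.Dict.contains_eq_isSome_get?]
    unfold aSeed
    rw [foldl_insert_nil_get? recipes PySem.Dict.empty x]
    by_cases hx : x ∈ recipes
    · rw [if_pos hx]
      exact (List.contains_iff_mem.mpr hx).symm
    · rw [if_neg hx, PySem.Dict.get?_empty]
      have h1 : recipes.contains x = false := by
        cases h : recipes.contains x
        · rfl
        · exact absurd (List.contains_iff_mem.mp h) hx
      rw [h1]
      rfl
  have h0 : ((0 : Nat) : Int) = (0 : Int) := by norm_num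
  have hA := aBuild_eq supply recipes ingredients recipes 0 (aSeed recipes)
    (by simpa using hpre) hseedinv (fun r hr => hr)
  rw [h0, List.drop_zero] at hA
  rw [hA]
  have hcont := contains_foldl_modifyF (fun q : String × String => [q.2])
    ((recipes.zip ingredients).flatMap (BLf supply recipes)) (aSeed recipes) c
  beta_reduce at hcont
  have hgetD := getD_foldl_modify_appendF (fun q : String × String => [q.2])
    ((recipes.zip ingredients).flatMap (BLf supply recipes)) (aSeed recipes) c
  beta_reduce at hgetD
  have hseedD : (aSeed recipes).getD c [] = [] := by
    rw [PySem.Dict.getD_eq_get?_getD]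
    unfold aSeed
    rw [foldl_insert_nil_get? recipes PySem.Dict.empty c, PySem.Dict.get?_empty]
    split <;> rfl
  by_cases hc : c ∈ recipes
  · have hcont2 : (((recipes.zip ingredients).flatMap (BLf supply recipes)).foldl
        (fun d q => d.modify q.1 [] (fun v => v ++ [q.2])) (aSeed recipes)).contains c = true := by
      rw [hcont, hseedinv c, List.contains_iff_mem.mpr hc]
      rfl
    rw [PySem.Dict.contains_eq_isSome_get?] at hcont2
    obtain ⟨v, hv⟩ := Option.isSome_iff_exists.mp hcont2
    rw [hv, if_pos hc]
    have hvD : (((recipes.zip ingredients).flatMap (BLf supply recipes)).foldl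
        (fun d q => d.modify q.1 [] (fun v => v ++ [q.2])) (aSeed recipes)).getD c [] = v := by
      rw [PySem.Dict.getD_eq_get?_getD, hv]
      rfl
    rw [hvD, hseedD, List.nil_append] at hgetD
    rw [hgetD]
    congr 1
    rw [← flat_filter_map supply recipes (recipes.zip ingredients) c]
    rw [← List.map_eq_flatMap]
  · have hrcf : recipes.contains c = false := by
      cases h : recipes.contains c
      · rfl
      · exact absurd (List.contains_iff_mem.mp h) hc
    have hcont2 : (((recipes.zip ingredients).flatMap (BLf supply recipes)).foldl
        (fun d q => d.modify q.1 [] (fun v => v ++ [q.2])) (aSeed recipes)).contains c = false := by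
      rw [hcont, hseedinv c, hrcf]
      simp only [Bool.false_or]
      rw [List.any_eq_false]
      intro q hq
      obtain ⟨p, hp, hqp⟩ := List.mem_flatMap.mp hq
      obtain ⟨i, _, hqe⟩ : ∃ a, (a ∈ p.2 ∧ a ∉ supply) ∧ (p.1, if a ∈ recipes then a else p.1) = q := by
        simpa [BLf, PySem.Set.contains] using hqp
      have hprec : p.1 ∈ recipes := by
        obtain ⟨a, b, hab⟩ : ∃ a b, p = (a, b) := ⟨p.1, p.2, rfl⟩
        subst hab
        exact (List.of_mem_zip hp).1
      rw [← hqe]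
      simp only [beq_iff_eq]
      intro hpc
      exact hc (hpc ▸ hprec)
    rw [if_neg hc]
    rw [PySem.Dict.contains_eq_isSome_get?] at hcont2
    exact Option.not_isSome_iff_eq_none.mp (by rw [hcont2]; exact Bool.false_ne_true)

theorem dedup_length_le (xs : List String) : (PySem.List.dedup xs).length ≤ xs.length :=
  ((PySem.List.nodup_dedup xs).subperm
    (fun x hx => (PySem.List.mem_dedup xs x).mp hx)).length_le

-- ===== assembling the equivalence =====

theorem main_equiv (recipes : List String) (ingredients : List (List String))
    (supplies : List String) (hpre : recipes.length ≤ ingredients.length) :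
    solution_1449_1_1 recipes ingredients supplies =
      solution_1449_1_1_alt recipes ingredients supplies := by
  simp only [solution_1449_1_1, solution_1449_1_1_alt]
  set sup := PySem.Set.ofList supplies with hsupdef
  set nd := bNeed sup ingredients (PySem.List.enumerate recipes 0) (bSeed recipes) with hnddef
  set g := aBuild sup ingredients (PySem.List.enumerate recipes 0) (aSeed recipes) with hgdef
  set M' := bLoop nd recipes (recipes.length + 1) PySem.Set.empty with hMdef
  have h0 : ((0 : Nat) : Int) = (0 : Int) := by norm_num
  have hz : nd = zNeed sup (recipes.zip ingredients) (bSeed recipes) := by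
    rw [hnddef, ← h0]
    have := bNeed_eq_z sup ingredients recipes 0 (bSeed recipes) (by simpa using hpre)
    rw [List.drop_zero] at this
    exact this
  have hnsc : ∀ c, nd.get? c =
      if c ∈ recipes then some (Lneed sup (recipes.zip ingredients) c) else none := by
    intro c
    rw [hz]
    exact zNeed_get? sup recipes ingredients c
  have Hsome : ∀ x, ((fun c => nd.get? c) x).isSome ↔ x ∈ recipes := by
    intro x
    beta_reduce
    rw [hnsc x]
    by_cases hx : x ∈ recipes <;> simp [hx]
  have HK : ∀ x, ((fun c => nd.get? c) x).isSome ↔ x ∈ PySem.List.dedup recipes := by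
    intro x
    rw [Hsome x]
    exact (PySem.List.mem_dedup recipes x).symm
  have HKnd : (PySem.List.dedup recipes).Nodup := PySem.List.nodup_dedup recipes
  have hsomecont : ∀ i, ((fun c => nd.get? c) i).isSome = recipes.contains i := by
    intro i
    by_cases h : i ∈ recipes
    · rw [List.contains_iff_mem.mpr h]
      exact (Hsome i).mpr h
    · have h1 : recipes.contains i = false := by
        cases hh : recipes.contains i
        · rfl
        · exact absurd (List.contains_iff_mem.mp hh) h
      rw [h1]
      simp only [hnsc i, if_neg h]
      rfl
  have Hg : ∀ c l, (fun c => nd.get? c) c = some l →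
      g.getD c [] = l.map (fun i => if ((fun c => nd.get? c) i).isSome then i else c) := by
    intro c l hl
    simp only at hl
    have hcrec : c ∈ recipes := by
      by_contra hcc
      rw [hnsc c, if_neg hcc] at hl
      cases hl
    have hlL : l = Lneed sup (recipes.zip ingredients) c := by
      rw [hnsc c, if_pos hcrec] at hl
      injection hl with h
      exact h.symm
    have hg2 := aGraph_get? sup recipes ingredients hpre c
    rw [if_pos hcrec] at hg2
    rw [PySem.Dict.getD_eq_get?_getD, ← hgdef] at *
    rw [hg2]
    simp only [Option.getD_some]
    rw [hlL]
    have hfun : (fun i => if ((fun c => nd.get? c) i).isSome = true then i else c)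
        = (fun i => if recipes.contains i = true then i else c) := by
      funext i
      rw [hsomecont i]
    rw [hfun]
  have hKlen : (PySem.List.dedup recipes).length ≤ recipes.length := dedup_length_le recipes
  obtain ⟨hsound, hstab⟩ := loop_spec nd recipes Hsome (recipes.length + 1) PySem.Set.empty
    List.nodup_nil (by intro x hx; cases hx) (by intro x hx; cases hx)
    (by simpa using Nat.lt_succ_of_le hKlen)
  have hcontMk : ∀ r, PySem.Set.contains M' r = true ↔ Mk (fun c => nd.get? c) r := by
    intro r
    constructor
    · intro h
      have hmem : r ∈ M' := by simpa [PySem.Set.contains] using h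
      exact hsound r hmem
    · intro h
      have hmem : r ∈ M' := mk_mem_final nd recipes M' Hsome hstab r h
      simpa [PySem.Set.contains] using hmem
  have hminv0 : MInv (fun c => nd.get? c) PySem.Dict.empty [] := by
    constructor
    · intro x b hx
      rw [PySem.Dict.get?_empty] at hx
      cases hx
    · intro x hx
      cases hx
  rw [topA g (fun c => nd.get? c) (PySem.List.dedup recipes) (recipes.length + 1) Hg HK HKnd
    (Nat.lt_succ_of_le hKlen) (fun r => PySem.Set.contains M' r) recipes [] PySem.Dict.empty
    (fun r hr => ⟨(Hsome r).mpr hr, hcontMk r⟩) hminv0]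
  rw [List.nil_append]

-- ===== VERDICT (by name: the statement is the Claim_ definition above) =====
theorem solution_1449_1_1_spec : Claim_equal_solution_1449_1_1 := by
  intro recipes ingredients supplies _ hpre
  unfold Spec_solution_1449_1_1
  exact main_equiv recipes ingredients supplies hpre
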